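-- pv_equiv track=rewrite | github.com/esxmod/programmers | level2/위장.py | solution
-- ===== SOURCE A (Python) =====
-- def solution(clothes):
--     d = {}
--     answer = 1
--
--     # 같은 이름으로 주어지는 경우는 없다.
--     for name, t in clothes:
--         if t not in d:
--             d[t] = 1
--         d[t] += 1
--
--     for num in d.values():
--         answer *= num
--
--     return answer - 1
-- ===== SOURCE B (Python) =====
-- def solution(clothes):
--     if not clothes:
--         return 0
--     c = clothes[0][1]
--     same = [x for x in clothes if x[1] == c]
--     rest = [x for x in clothes if x[1] != c]
--     return (len(same) + 1) * (solution(rest) + 1) - 1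
-- ===== Notes on version B (the rewrite author's own statement) =====
-- stated objective: alternative
-- what changed: Replaces A's dict-counting pass plus values-product loop with a recursive divide-and-conquer: partition the list by the first element's category, multiply (group size + 1) into the recursive result on the remainder.
import Mathlib
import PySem

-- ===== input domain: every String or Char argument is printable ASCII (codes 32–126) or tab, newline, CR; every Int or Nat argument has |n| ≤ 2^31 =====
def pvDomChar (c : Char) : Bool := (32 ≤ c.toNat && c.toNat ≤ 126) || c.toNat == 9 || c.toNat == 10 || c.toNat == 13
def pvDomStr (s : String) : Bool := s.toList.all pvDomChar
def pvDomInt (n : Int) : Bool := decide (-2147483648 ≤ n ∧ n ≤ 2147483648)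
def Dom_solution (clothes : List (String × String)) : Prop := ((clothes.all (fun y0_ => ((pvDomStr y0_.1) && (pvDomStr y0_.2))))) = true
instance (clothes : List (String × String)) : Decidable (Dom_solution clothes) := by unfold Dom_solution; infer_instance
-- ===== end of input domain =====

-- B replaces A's dict-accumulation with a recursive partition on the first category (alternative algorithm, same result).

-- ===== PORT A =====
-- d[t] is always present when `d[t] += 1` runs (the branch just inserted it), so `modify t 0 (· + 1)` is exact.
def solution (clothes : List (String × String)) : Int :=
  let d := clothes.foldl
    (fun d x =>
      let d' := if !(d.contains x.2) then d.insert x.2 (1 : Int) else d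
      d'.modify x.2 0 (· + 1))
    PySem.Dict.empty
  let answer := d.values.foldl (fun a num => a * num) (1 : Int)
  answer - 1

-- ===== PORT B =====
def solution_alt : List (String × String) → Int
  | [] => 0
  | x :: xs =>
    let c := x.2
    let same := (x :: xs).filter (fun y => y.2 == c)
    let rest := (x :: xs).filter (fun y => y.2 != c)
    ((same.length : Int) + 1) * (solution_alt rest + 1) - 1
termination_by l => l.length
decreasing_by
  simp only [List.filter_cons, bne_self_eq_false, Bool.false_eq_true, if_false, List.length_cons]
  have := List.length_filter_le (fun y => y.2 != x.2) xs
  omega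

-- ===== PRECONDITION & SPEC =====
def Spec_solution (clothes : List (String × String)) (out : Int) : Prop := out = solution_alt clothes
instance (clothes : List (String × String)) (out : Int) : Decidable (Spec_solution clothes out) := by unfold Spec_solution; infer_instance

-- ===== CLAIM (what is proved, stated in full; the proofs are below) =====
def Claim_equal_solution : Prop := ∀ (clothes : List (String × String)), Dom_solution clothes → Spec_solution clothes (solution clothes)

-- ===== LEMMAS AND PROOFS =====

-- the common value: product over the distinct categories of (count + 1)
def catProd (cats : List String) : Int := ∏ k ∈ cats.toFinset, ((cats.count k : Int) + 1)

theorem stepA_eq (d : PySem.Dict String Int) (t : String) :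
    (if !(d.contains t) then d.insert t (1 : Int) else d).modify t 0 (· + 1)
      = d.modify t 1 (· + 1) := by
  show PySem.Dict.modify _ _ _ _ = _
  by_cases h : d.contains t
  · simp only [h, Bool.not_true, Bool.false_eq_true, if_false]
    show d.insert t (d.getD t 0 + 1) = d.insert t (d.getD t 1 + 1)
    have h2 : (d.get? t).isSome = true := by
      rw [← PySem.Dict.contains_eq_isSome_get?]; exact h
    cases hg : d.get? t with
    | none => rw [hg] at h2; simp at h2
    | some v => simp [PySem.Dict.getD_eq_get?_getD, hg]
  · simp only [h, Bool.not_false, if_true]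
    show (d.insert t 1).insert t ((d.insert t 1).getD t 0 + 1)
       = d.insert t (d.getD t 1 + 1)
    have h' : d.contains t = false := by simpa using h
    rw [PySem.Dict.getD_insert_self, PySem.Dict.insert_insert_self,
        PySem.Dict.getD_of_not_contains d _ h']

theorem getD_fold (l : List String) (d : PySem.Dict String Int) (v : String) :
    (l.foldl (fun d t => d.modify t 1 (· + 1)) d).getD v 1 = d.getD v 1 + l.count v := by
  induction l generalizing d with
  | nil => simp
  | cons t l ih =>
      simp only [List.foldl_cons, ih, PySem.Dict.getD_modify, List.count_cons]
      by_cases h : v = t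
      · simp [h]; ring
      · simp [h]; exact fun e => h e.symm

-- A computes catProd of the category list, minus 1
theorem solution_eq_catProd (clothes : List (String × String)) :
    solution clothes = catProd (clothes.map Prod.snd) - 1 := by
  unfold solution
  simp only [stepA_eq]
  set F := fun (d : PySem.Dict String Int) (x : String × String) => d.modify x.2 1 (· + 1) with hF
  have hkeys : (clothes.foldl F PySem.Dict.empty).keys
      = PySem.Set.ofList (clothes.map Prod.snd) := by
    rw [hF, PySem.Dict.keys_foldl_modify_key clothes (fun x => x.2) 1
          (fun _ _ v => v + 1) PySem.Dict.empty]
    rfl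
  have hnodup : (clothes.foldl F PySem.Dict.empty).keys.Nodup := by
    rw [hkeys]; exact PySem.Set.nodup_ofList _
  have hval : ∀ v, (clothes.foldl F PySem.Dict.empty).getD v 1
      = 1 + (clothes.map Prod.snd).count v := by
    intro v
    have := getD_fold (clothes.map Prod.snd) PySem.Dict.empty v
    rw [List.foldl_map] at this
    simpa [PySem.Dict.getD_empty] using this
  rw [PySem.Dict.values_eq_map_keys _ hnodup 1, hkeys]
  have hprod : ((PySem.Set.ofList (clothes.map Prod.snd)).map
        (fun k => (clothes.foldl F PySem.Dict.empty).getD k 1)).foldl (fun a num => a * num) 1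
      = catProd (clothes.map Prod.snd) := by
    rw [← List.prod_eq_foldl]
    have hnd : (PySem.Set.ofList (clothes.map Prod.snd)).Nodup := PySem.Set.nodup_ofList _
    rw [← List.prod_toFinset _ hnd]
    have hfs : (PySem.Set.ofList (clothes.map Prod.snd)).toFinset
        = (clothes.map Prod.snd).toFinset := by
      ext a; simp [List.mem_toFinset, PySem.Set.mem_ofList]
    rw [hfs, catProd]
    exact Finset.prod_congr rfl (fun k _ => by rw [hval k]; ring)
  rw [hprod]

theorem count_eq_length_filter (cats : List String) (c : String) :
    (cats.count c : Int) = ((cats.filter (fun t => t == c)).length : Int) := by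
  simp only [List.count]
  exact congrArg _ List.countP_eq_length_filter

-- peeling the head category off catProd
theorem catProd_cons (cats : List String) (c : String) (hc : c ∈ cats) :
    catProd cats = ((cats.count c : Int) + 1) * catProd (cats.filter (fun t => t != c)) := by
  have hcs : c ∈ cats.toFinset := List.mem_toFinset.mpr hc
  have hsub : (cats.filter (fun t => t != c)).toFinset = cats.toFinset.erase c := by
    ext a
    simp [Finset.mem_erase, and_comm]
  have h2 : catProd (cats.filter (fun t => t != c))
      = ∏ k ∈ cats.toFinset.erase c, ((cats.count k : Int) + 1) := by
    rw [catProd, hsub]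
    refine Finset.prod_congr rfl (fun k hk => ?_)
    have hkc : k ≠ c := (Finset.mem_erase.mp hk).1
    rw [List.count_filter]
    simp [hkc]
  rw [h2, catProd, ← Finset.mul_prod_erase _ _ hcs]

theorem solution_alt_add_one (clothes : List (String × String)) :
    solution_alt clothes + 1 = catProd (clothes.map Prod.snd) := by
  induction hn : clothes.length using Nat.strong_induction_on generalizing clothes with
  | _ n ih =>
  cases clothes with
  | nil => simp [solution_alt, catProd]
  | cons x xs =>
      rw [solution_alt]
      have hlt : ((x :: xs).filter (fun y => y.2 != x.2)).length < n := by
        subst hn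
        simp only [List.filter_cons, bne_self_eq_false, Bool.false_eq_true, if_false,
          List.length_cons]
        have := List.length_filter_le (fun y => y.2 != x.2) xs
        omega
      have ihr := ih _ hlt ((x :: xs).filter (fun y => y.2 != x.2)) rfl
      have hmem : x.2 ∈ (x :: xs).map Prod.snd := by simp
      have hrest : ((x :: xs).filter (fun y => y.2 != x.2)).map Prod.snd
          = ((x :: xs).map Prod.snd).filter (fun t => t != x.2) := by
        rw [List.filter_map]; rfl
      have hsame : (((x :: xs).filter (fun y => y.2 == x.2)).length : Int)
          = (((x :: xs).map Prod.snd).count x.2 : Int) := by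
        rw [count_eq_length_filter, List.filter_map]
        simp [Function.comp_def]
      rw [catProd_cons _ x.2 hmem, ← hrest, ← hsame, ← ihr]
      ring

-- ===== VERDICT (by name: the statement is the Claim_ definition above) =====
theorem solution_spec : Claim_equal_solution := by
  intro clothes _
  unfold Spec_solution
  have hb := solution_alt_add_one clothes
  rw [solution_eq_catProd, ← hb]
  ring
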